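-- pv_equiv track=rewrite | github.com/CristianBatz/Actividad09 | AgenciaViajes.py | cliente_destinos
-- ===== SOURCE A (Python) =====
-- def cliente_destinos(clientes, lista_clientes, indice=0, cliente_mayor='', maximos_destinos=0):
--     if indice >= len(lista_clientes):
--         return cliente_mayor, maximos_destinos
--     else:
--         carnet = lista_clientes[indice]
--         destinos_actuales = len(clientes[carnet]['destinos'])
--         if destinos_actuales > maximos_destinos:
--             cliente_mayor = carnet
--             maximos_destinos = destinos_actuales
--         return cliente_destinos(clientes, lista_clientes, indice + 1, cliente_mayor, maximos_destinos)
-- ===== SOURCE B (Python) =====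
-- def cliente_destinos(clientes, lista_clientes, indice=0, cliente_mayor='', maximos_destinos=0):
--     for i in range(indice, len(lista_clientes)):
--         carnet = lista_clientes[i]
--         destinos_actuales = len(clientes[carnet]['destinos'])
--         if destinos_actuales > maximos_destinos:
--             cliente_mayor = carnet
--             maximos_destinos = destinos_actuales
--     return cliente_mayor, maximos_destinos
-- ===== Notes on version B (the rewrite author's own statement) =====
-- stated objective: idiomatic
-- what changed: Replaced the tail-recursive accumulator-threading recursion (one Python call frame per client, limited by the recursion limit) with a single iterative for-loop over range(indice, len(lista_clientes)) updating the two accumulators in place.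
import Mathlib
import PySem

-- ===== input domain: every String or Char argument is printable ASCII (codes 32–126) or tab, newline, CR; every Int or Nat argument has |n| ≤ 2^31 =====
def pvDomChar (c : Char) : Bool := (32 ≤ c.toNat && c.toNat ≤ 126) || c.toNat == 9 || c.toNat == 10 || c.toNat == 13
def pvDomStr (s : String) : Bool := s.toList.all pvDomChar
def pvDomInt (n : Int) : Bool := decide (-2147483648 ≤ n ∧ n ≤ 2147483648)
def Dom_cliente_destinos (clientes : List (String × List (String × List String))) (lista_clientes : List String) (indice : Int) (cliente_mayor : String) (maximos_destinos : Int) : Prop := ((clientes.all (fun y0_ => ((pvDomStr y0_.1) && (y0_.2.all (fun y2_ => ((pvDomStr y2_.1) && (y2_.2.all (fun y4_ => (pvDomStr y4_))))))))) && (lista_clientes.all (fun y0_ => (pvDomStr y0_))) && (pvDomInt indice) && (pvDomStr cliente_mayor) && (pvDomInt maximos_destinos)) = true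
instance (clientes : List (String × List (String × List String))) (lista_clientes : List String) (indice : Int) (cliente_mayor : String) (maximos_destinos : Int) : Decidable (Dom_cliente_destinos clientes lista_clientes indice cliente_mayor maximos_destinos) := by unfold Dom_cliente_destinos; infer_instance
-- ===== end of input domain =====

-- B replaces A's accumulator-threading recursion by a single iterative loop over
-- range(indice, len(lista_clientes)); same return value on every input admitted by Pre_.

-- ===== PORT A =====
-- looks up clientes[carnet]['destinos'] and returns its length; none = the KeyError A raises
def pvDestinos? (clientes : List (String × List (String × List String))) (carnet : String) : Option Int :=
  match clientes.lookup carnet with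
  | none => none
  | some d =>
    match d.lookup "destinos" with
    | none => none
    | some dest => some (dest.length : Int)

def cliente_destinos (clientes : List (String × List (String × List String))) (lista_clientes : List String) (indice : Int) (cliente_mayor : String) (maximos_destinos : Int) : String × Int :=
  if _h : (lista_clientes.length : Int) ≤ indice then
    (cliente_mayor, maximos_destinos)
  else
    match PySem.List.pyGet? lista_clientes indice with
    | none => ("", -1)   -- IndexError in Python; excluded by Pre_
    | some carnet =>
      match pvDestinos? clientes carnet with
      | none => ("", -1) -- KeyError in Python; excluded by Pre_
      | some destinos_actuales =>
        if destinos_actuales > maximos_destinos then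
          cliente_destinos clientes lista_clientes (indice + 1) carnet destinos_actuales
        else
          cliente_destinos clientes lista_clientes (indice + 1) cliente_mayor maximos_destinos
termination_by ((lista_clientes.length : Int) - indice).toNat
decreasing_by all_goals omega

-- ===== PORT B =====
-- one iteration of B's for-loop; a failed lookup (Python raises there) keeps the state
def pvStep (clientes : List (String × List (String × List String))) (lista_clientes : List String) (st : String × Int) (i : Int) : String × Int :=
  match PySem.List.pyGet? lista_clientes i with
  | none => st
  | some carnet =>
    match pvDestinos? clientes carnet with
    | none => st
    | some destinos_actuales =>
      if destinos_actuales > st.2 then (carnet, destinos_actuales) else st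

def cliente_destinos_alt (clientes : List (String × List (String × List String))) (lista_clientes : List String) (indice : Int) (cliente_mayor : String) (maximos_destinos : Int) : String × Int :=
  (PySem.List.pyRange indice (lista_clientes.length : Int) 1).foldl
    (pvStep clientes lista_clientes) (cliente_mayor, maximos_destinos)

-- ===== PRECONDITION & SPEC =====
-- true iff index i and the two dict lookups behind it all succeed
def pvOk (clientes : List (String × List (String × List String))) (lista_clientes : List String) (i : Int) : Bool :=
  match PySem.List.pyGet? lista_clientes i with
  | none => false
  | some carnet => (pvDestinos? clientes carnet).isSome

-- Pre_ excludes exactly the inputs on which A raises: some visited index i in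
-- range(indice, len) hits an out-of-range negative index (IndexError) or a carnet
-- missing from clientes / a client record without 'destinos' (KeyError); the first
-- disjunct is the empty loop, the -len bound keeps the visited range finite and small.
def Pre_cliente_destinos (clientes : List (String × List (String × List String))) (lista_clientes : List String) (indice : Int) (cliente_mayor : String) (maximos_destinos : Int) : Prop :=
  (lista_clientes.length : Int) ≤ indice ∨
    (-(lista_clientes.length : Int) ≤ indice ∧
      (PySem.List.pyRange indice (lista_clientes.length : Int) 1).all (pvOk clientes lista_clientes) = true)

instance (clientes : List (String × List (String × List String))) (lista_clientes : List String) (indice : Int) (cliente_mayor : String) (maximos_destinos : Int) : Decidable (Pre_cliente_destinos clientes lista_clientes indice cliente_mayor maximos_destinos) := by unfold Pre_cliente_destinos; infer_instance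

def pvWitness_cliente_destinos : (List (String × List (String × List String))) × List String × Int × String × Int :=
  ([("A", [("destinos", ["x", "y"])]), ("B", [("destinos", ["z"])])], ["A", "B"], 0, "", 0)

def Spec_cliente_destinos (clientes : List (String × List (String × List String))) (lista_clientes : List String) (indice : Int) (cliente_mayor : String) (maximos_destinos : Int) (out : String × Int) : Prop := out = cliente_destinos_alt clientes lista_clientes indice cliente_mayor maximos_destinos
instance (clientes : List (String × List (String × List String))) (lista_clientes : List String) (indice : Int) (cliente_mayor : String) (maximos_destinos : Int) (out : String × Int) : Decidable (Spec_cliente_destinos clientes lista_clientes indice cliente_mayor maximos_destinos out) := by unfold Spec_cliente_destinos; infer_instance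

-- ===== CLAIM (what is proved, stated in full; the proofs are below) =====
def Claim_equal_cliente_destinos : Prop := ∀ (clientes : List (String × List (String × List String))) (lista_clientes : List String) (indice : Int) (cliente_mayor : String) (maximos_destinos : Int), Dom_cliente_destinos clientes lista_clientes indice cliente_mayor maximos_destinos → Pre_cliente_destinos clientes lista_clientes indice cliente_mayor maximos_destinos → Spec_cliente_destinos clientes lista_clientes indice cliente_mayor maximos_destinos (cliente_destinos clientes lista_clientes indice cliente_mayor maximos_destinos)

-- ===== LEMMAS AND PROOFS =====

theorem pv_main (clientes : List (String × List (String × List String))) (lista_clientes : List String) :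
    ∀ (n : Nat) (indice : Int) (cliente_mayor : String) (maximos_destinos : Int),
      ((lista_clientes.length : Int) - indice).toNat = n →
      (PySem.List.pyRange indice (lista_clientes.length : Int) 1).all (pvOk clientes lista_clientes) = true →
      cliente_destinos clientes lista_clientes indice cliente_mayor maximos_destinos =
        cliente_destinos_alt clientes lista_clientes indice cliente_mayor maximos_destinos := by
  intro n
  induction n with
  | zero =>
    intro indice cm md hn _hpre
    have hle : (lista_clientes.length : Int) ≤ indice := by omega
    rw [cliente_destinos, cliente_destinos_alt, PySem.List.pyRange_one_eq_nil hle]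
    simp [hle]
  | succ k ih =>
    intro indice cm md hn hpre
    have hlt : indice < (lista_clientes.length : Int) := by omega
    rw [PySem.List.pyRange_one_cons hlt] at hpre
    simp only [List.all_cons, Bool.and_eq_true] at hpre
    obtain ⟨hok, hrest⟩ := hpre
    unfold pvOk at hok
    rw [cliente_destinos]
    rw [cliente_destinos_alt, PySem.List.pyRange_one_cons hlt, List.foldl_cons]
    have hnle : ¬ ((lista_clientes.length : Int) ≤ indice) := by omega
    simp only [hnle, dite_false]
    cases hg : PySem.List.pyGet? lista_clientes indice with
    | none => rw [hg] at hok; simp at hok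
    | some carnet =>
      rw [hg] at hok
      simp only [Option.isSome] at hok
      cases hd : pvDestinos? clientes carnet with
      | none => rw [hd] at hok; simp at hok
      | some da =>
        simp only [pvStep, hg, hd]
        by_cases hcmp : da > md
        · simp only [if_pos hcmp]
          exact (ih (indice + 1) carnet da (by omega) hrest).trans
            (by rw [cliente_destinos_alt])
        · simp only [if_neg hcmp]
          exact (ih (indice + 1) cm md (by omega) hrest).trans
            (by rw [cliente_destinos_alt])

-- ===== VERDICT (by name: the statement is the Claim_ definition above) =====
theorem cliente_destinos_spec : Claim_equal_cliente_destinos := by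
  intro clientes lista_clientes indice cm md _hdom hpre
  unfold Spec_cliente_destinos
  have hall : (PySem.List.pyRange indice (lista_clientes.length : Int) 1).all (pvOk clientes lista_clientes) = true := by
    rcases hpre with h | ⟨_, h2⟩
    · rw [PySem.List.pyRange_one_eq_nil h]; rfl
    · exact h2
  exact pv_main clientes lista_clientes _ indice cm md rfl hall
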